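-- pv_equiv track=rewrite | github.com/dereadi/ganuda_ai | services/arc_agi_3/game_experience.py | _classify_action_types
-- ===== SOURCE A (Python) =====
-- from typing import Any, Dict, List, Optional
--
-- def _classify_action_types(action_history: List[str]) -> str:
--     """
--     Classify the game's action type from the history of action names.
--
--     Returns one of: 'keyboard', 'click', 'keyboard_click', 'unknown'.
--     """
--     if not action_history:
--         return 'unknown'
--
--     keyboard_actions = {'ACTION1', 'ACTION2', 'ACTION3', 'ACTION4', 'ACTION5'}
--     click_actions = {'ACTION6'}
--
--     has_keyboard = any(a in keyboard_actions for a in action_history)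
--     has_click = any(a in click_actions for a in action_history)
--
--     if has_keyboard and has_click:
--         return 'keyboard_click'
--     elif has_keyboard:
--         return 'keyboard'
--     elif has_click:
--         return 'click'
--     return 'unknown'
-- ===== SOURCE B (Python) =====
-- from typing import List
--
-- _KEYBOARD = ('ACTION1', 'ACTION2', 'ACTION3', 'ACTION4', 'ACTION5')
-- _LABELS = ('unknown', 'keyboard', 'click', 'keyboard_click')
--
-- def _classify_action_types(action_history: List[str]) -> str:
--     """Single pass: OR each action's 2-bit code (1=keyboard, 2=click) into an
--     accumulator, then index a label table — no flags, no branch chain."""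
--     code = 0
--     for a in action_history:
--         if a == 'ACTION6':
--             code |= 2
--         elif a in _KEYBOARD:
--             code |= 1
--     return _LABELS[code]
-- ===== Notes on version B (the rewrite author's own statement) =====
-- stated objective: alternative
-- what changed: Replaces A's two separate any(...) scans plus a four-way if/elif chain by one single pass that ORs a 2-bit code (1=keyboard, 2=click) per action into an accumulator and then indexes a label table with the code.
import Mathlib
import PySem

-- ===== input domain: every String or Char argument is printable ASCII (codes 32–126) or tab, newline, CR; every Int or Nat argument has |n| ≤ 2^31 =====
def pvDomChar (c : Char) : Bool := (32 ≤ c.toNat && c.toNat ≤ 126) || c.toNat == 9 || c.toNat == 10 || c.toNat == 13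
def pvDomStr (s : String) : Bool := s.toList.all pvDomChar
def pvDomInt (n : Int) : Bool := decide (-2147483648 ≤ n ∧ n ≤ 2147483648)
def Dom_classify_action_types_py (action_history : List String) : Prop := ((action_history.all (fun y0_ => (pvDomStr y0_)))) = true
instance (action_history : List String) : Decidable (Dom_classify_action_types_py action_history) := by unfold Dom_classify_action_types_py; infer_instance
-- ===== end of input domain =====

-- B replaces A's two any(...) scans and four-way branch chain by one single pass
-- ORing a 2-bit code (1=keyboard, 2=click) per action, then a label-table lookup (alternative).

-- ===== PORT A =====
def classify_action_types_py (action_history : List String) : String :=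
  if action_history = [] then "unknown"
  else
    let keyboard_actions : PySem.Set String :=
      PySem.Set.ofList ["ACTION1", "ACTION2", "ACTION3", "ACTION4", "ACTION5"]
    let click_actions : PySem.Set String := PySem.Set.ofList ["ACTION6"]
    let has_keyboard := action_history.any (fun a => PySem.Set.contains keyboard_actions a)
    let has_click := action_history.any (fun a => PySem.Set.contains click_actions a)
    if has_keyboard && has_click then "keyboard_click"
    else if has_keyboard then "keyboard"
    else if has_click then "click"
    else "unknown"

-- ===== PORT B =====
-- the per-action 2-bit code OR'd into the accumulator (body of Source B's loop)
def pvStepB (code : Nat) (a : String) : Nat :=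
  if a = "ACTION6" then code ||| 2
  else if a ∈ ["ACTION1", "ACTION2", "ACTION3", "ACTION4", "ACTION5"] then code ||| 1
  else code

def classify_action_types_py_alt (action_history : List String) : String :=
  let code := action_history.foldl pvStepB 0
  -- _LABELS[code]: code is always in 0..3, so the Python indexing cannot raise
  (PySem.List.pyGet? ["unknown", "keyboard", "click", "keyboard_click"] (code : Int)).getD ""

-- ===== PRECONDITION & SPEC =====
def Spec_classify_action_types_py (action_history : List String) (out : String) : Prop := out = classify_action_types_py_alt action_history
instance (action_history : List String) (out : String) : Decidable (Spec_classify_action_types_py action_history out) := by unfold Spec_classify_action_types_py; infer_instance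

-- ===== CLAIM (what is proved, stated in full; the proofs are below) =====
def Claim_equal_classify_action_types_py : Prop := ∀ (action_history : List String), Dom_classify_action_types_py action_history → Spec_classify_action_types_py action_history (classify_action_types_py action_history)

-- ===== LEMMAS AND PROOFS =====

-- the code B's fold produces, characterised by the two boolean facts A computes
def pvTarget (xs : List String) : Nat :=
  (if xs.any (fun a => a ∈ ["ACTION1", "ACTION2", "ACTION3", "ACTION4", "ACTION5"]) then 1 else 0) |||
  (if xs.any (fun a => a = "ACTION6") then 2 else 0)

theorem lor_absorb (c : Nat) {a x y : Nat} (h : a ||| x = y) : c ||| a ||| x = c ||| y := by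
  rw [Nat.lor_assoc, h]

theorem foldl_pvStepB (xs : List String) (c : Nat) :
    xs.foldl pvStepB c = c ||| pvTarget xs := by
  induction xs generalizing c with
  | nil => simp [pvTarget]
  | cons a rest ih =>
    simp only [List.foldl_cons, ih, pvStepB, pvTarget, List.any_cons]
    by_cases hA : a = "ACTION6"
    · simp [hA]
      split_ifs <;> (apply lor_absorb) <;> decide
    · by_cases hK : a ∈ ["ACTION1", "ACTION2", "ACTION3", "ACTION4", "ACTION5"]
      · simp [hA, hK]
        split_ifs <;> (apply lor_absorb) <;> decide
      · simp [hA, hK]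

theorem pvSetContains_kb (a : String) :
    PySem.Set.contains (PySem.Set.ofList ["ACTION1", "ACTION2", "ACTION3", "ACTION4", "ACTION5"]) a
      = decide (a ∈ ["ACTION1", "ACTION2", "ACTION3", "ACTION4", "ACTION5"]) := by
  rw [Bool.eq_iff_iff]
  simp [PySem.Set.mem_ofList]

theorem pvSetContains_click (a : String) :
    PySem.Set.contains (PySem.Set.ofList ["ACTION6"]) a = decide (a = "ACTION6") := by
  rw [Bool.eq_iff_iff]
  simp [PySem.Set.mem_ofList]

-- ===== VERDICT (by name: the statement is the Claim_ definition above) =====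
theorem classify_action_types_py_spec : Claim_equal_classify_action_types_py := by
  intro xs _
  show classify_action_types_py xs = classify_action_types_py_alt xs
  unfold classify_action_types_py classify_action_types_py_alt
  rw [foldl_pvStepB]
  by_cases h : xs = []
  · subst h; rfl
  · simp only [if_neg h, pvTarget, pvSetContains_kb, pvSetContains_click]
    cases hk : (xs.any fun a => decide (a ∈ ["ACTION1", "ACTION2", "ACTION3", "ACTION4", "ACTION5"])) <;>
      cases hc : (xs.any fun a => decide (a = "ACTION6")) <;>
        simp [hk, hc, PySem.List.pyGet?, PySem.List.pyIdx?]
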